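-- pv_equiv track=rewrite | github.com/ripxorip/ripxospeech | keyboard_server/utils.py | process_shift_modifiers
-- ===== SOURCE A (Python) =====
-- def process_shift_modifiers(chunk):
--     ret = chunk
--     # Get the indices of all shift key presses
--     indices = [i for i, x in enumerate(chunk) if x == "key_leftshift" or x == "key_rightshift"]
--     for i in indices:
--         if i+1 < len(chunk):
--             ret[i] = ''
--             ret[i + 1] = ret[i + 1].upper()
--     filt = []
--     for i in range(len(ret)):
--         if ret[i] == '':
--             continue
--         filt.append(ret[i])
--     ret = filt
--     return ret
-- ===== SOURCE B (Python) =====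
-- def process_shift_modifiers(chunk):
--     # Single forward pass with an "uppercase next token" flag instead of A's
--     # three phases (index collection, in-place blank/uppercase, filter pass).
--     # Unlike A, this does not mutate the input list; the return value is identical.
--     out = []
--     upper_next = False
--     n = len(chunk)
--     for i, tok in enumerate(chunk):
--         if (tok == "key_leftshift" or tok == "key_rightshift") and i + 1 < n:
--             upper_next = True
--             continue
--         t = tok.upper() if upper_next else tok
--         upper_next = False
--         if t != '':
--             out.append(t)
--     return out
-- ===== Notes on version B (the rewrite author's own statement) =====
-- stated objective: simpler
-- what changed: Replaces A's three phases (collect shift indices, in-place blank/uppercase mutation pass, then a filter pass) with one forward pass carrying an 'uppercase next token' flag that skips non-trailing shifts and appends tokens directly; B does not mutate the input list (return value is identical).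
import Mathlib
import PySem

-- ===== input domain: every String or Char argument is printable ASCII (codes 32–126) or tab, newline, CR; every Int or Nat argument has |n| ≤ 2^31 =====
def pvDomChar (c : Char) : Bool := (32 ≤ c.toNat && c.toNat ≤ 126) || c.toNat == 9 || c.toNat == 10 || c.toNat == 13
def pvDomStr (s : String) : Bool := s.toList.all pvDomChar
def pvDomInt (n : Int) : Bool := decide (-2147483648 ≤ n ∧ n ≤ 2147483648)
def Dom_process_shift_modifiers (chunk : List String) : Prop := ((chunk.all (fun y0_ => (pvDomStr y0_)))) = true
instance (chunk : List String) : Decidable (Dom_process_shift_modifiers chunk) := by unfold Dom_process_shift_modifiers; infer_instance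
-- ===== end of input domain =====

-- B replaces A's three phases (collect shift indices, in-place blank/uppercase, filter) by one
-- forward pass with an "uppercase next token" flag (objective: simpler). A mutates its argument
-- in place; B does not — the equivalence proved here is about the RETURN value only.

-- ===== PORT A =====
-- shared tiny predicate: x == "key_leftshift" or x == "key_rightshift"
def pvIsShift (x : String) : Bool := x == "key_leftshift" || x == "key_rightshift"

-- one iteration of A's mutation loop: 'if i+1 < len(chunk): ret[i] = ''; ret[i+1] = ret[i+1].upper()'
def pvStepA (L : Nat) (ret : List String) (i : Nat) : List String :=
  if i + 1 < L then
    let r1 := ret.set i ""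
    r1.set (i + 1) (PySem.Str.upper (r1.getD (i + 1) ""))
  else ret

def process_shift_modifiers (chunk : List String) : List String :=
  -- indices = [i for i, x in enumerate(chunk) if x == "key_leftshift" or x == "key_rightshift"]
  -- (enumerate indices are nonnegative, so they are carried as Nat via zipIdx)
  let indices := ((chunk.zipIdx).filter (fun p => pvIsShift p.1)).map (·.2)
  let ret := indices.foldl (pvStepA chunk.length) chunk
  -- filter loop over range(len(ret)) reading ret[i] (always in range, so getD is exact)
  (List.range ret.length).foldl
    (fun filt i => if ret.getD i "" == "" then filt else filt ++ [ret.getD i ""]) []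

-- ===== PORT B =====
-- one iteration of B's single pass: state = (out, upper_next), p = (tok, i)
def pvStepB (n : Nat) (st : List String × Bool) (p : String × Nat) : List String × Bool :=
  if pvIsShift p.1 && decide (p.2 + 1 < n) then (st.1, true)
  else
    let t := if st.2 then PySem.Str.upper p.1 else p.1
    ((if t == "" then st.1 else st.1 ++ [t]), false)

def process_shift_modifiers_alt (chunk : List String) : List String :=
  ((chunk.zipIdx).foldl (pvStepB chunk.length) ([], false)).1

-- ===== PRECONDITION & SPEC =====
def Spec_process_shift_modifiers (chunk : List String) (out : List String) : Prop := out = process_shift_modifiers_alt chunk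
instance (chunk : List String) (out : List String) : Decidable (Spec_process_shift_modifiers chunk out) := by unfold Spec_process_shift_modifiers; infer_instance

-- ===== CLAIM (what is proved, stated in full; the proofs are below) =====
def Claim_equal_process_shift_modifiers : Prop := ∀ (chunk : List String), Dom_process_shift_modifiers chunk → Spec_process_shift_modifiers chunk (process_shift_modifiers chunk)

-- ===== LEMMAS AND PROOFS =====

-- common recursive characterization of the result (B's algorithm written structurally)
def pvGo : Bool → List String → List String
  | _, [] => []
  | up, x :: rest =>
    if pvIsShift x && !rest.isEmpty then pvGo true rest
    else
      let t := if up then PySem.Str.upper x else x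
      (if t == "" then [] else [t]) ++ pvGo false rest

-- the effect of a pending shift on the head of the remaining list
def pvApplyUp : Bool → List String → List String
  | false, xs => xs
  | true, [] => []
  | true, x :: xs => PySem.Str.upper x :: xs

-- indices of A, as a function (zipIdx from 0)
def pvIndices (xs : List String) : List Nat :=
  ((xs.zipIdx).filter (fun p => pvIsShift p.1)).map (·.2)

lemma pvZipIdx_shift (xs : List String) (i : Nat) :
    xs.zipIdx (i + 1) = (xs.zipIdx i).map (fun p => (p.1, p.2 + 1)) := by
  induction xs generalizing i with
  | nil => simp [List.zipIdx]
  | cons x rest ih => simp [List.zipIdx, ih]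

lemma pvIndices_cons (x : String) (rest : List String) :
    pvIndices (x :: rest)
      = (if pvIsShift x then [0] else []) ++ (pvIndices rest).map (· + 1) := by
  unfold pvIndices
  have h : (x :: rest).zipIdx = (x, 0) :: rest.zipIdx 1 := by simp [List.zipIdx]
  rw [h, show rest.zipIdx 1 = rest.zipIdx (0 + 1) from rfl, pvZipIdx_shift]
  by_cases hs : pvIsShift x <;>
    simp [hs, List.filter_map, List.map_map, Function.comp_def]

lemma pvStepA_cons (L : Nat) (x : String) (ret : List String) (j : Nat) :
    pvStepA (L + 1) (x :: ret) (j + 1) = x :: pvStepA L ret j := by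
  unfold pvStepA
  by_cases h : j + 1 < L
  · rw [if_pos (by omega), if_pos h]
    simp [List.set, List.getD]
  · rw [if_neg (by omega), if_neg h]

lemma pvFold_shift (idxs : List Nat) (L : Nat) (x : String) (ret : List String) :
    List.foldl (pvStepA (L + 1)) (x :: ret) (idxs.map (· + 1))
      = x :: List.foldl (pvStepA L) ret idxs := by
  induction idxs generalizing ret with
  | nil => simp
  | cons j js ih => simp [pvStepA_cons, ih]

lemma pvFilter_fold (ret acc : List String) :
    (List.range ret.length).foldl
        (fun filt i => if ret.getD i "" == "" then filt else filt ++ [ret.getD i ""]) acc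
      = acc ++ ret.filter (fun s => !(s == "")) := by
  induction ret using List.reverseRecOn generalizing acc with
  | nil => simp
  | append_singleton l a ih =>
    rw [List.length_append, List.length_singleton, List.range_succ, List.foldl_append]
    have hcong :
        (List.range l.length).foldl
            (fun filt i => if (l ++ [a]).getD i "" == "" then filt else filt ++ [(l ++ [a]).getD i ""]) acc
          = (List.range l.length).foldl
            (fun filt i => if l.getD i "" == "" then filt else filt ++ [l.getD i ""]) acc := by
      apply PySem.List.foldl_congr_mem
      intro acc' i hi
      have hil : i < l.length := List.mem_range.mp hi
      have hget : (l ++ [a]).getD i "" = l.getD i "" := by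
        simp [List.getD_eq_getElem?_getD, List.getElem?_append_left hil]
      rw [hget]
    rw [hcong, ih]
    have hlast : (l ++ [a]).getD l.length "" = a := by
      simp [List.getD_eq_getElem?_getD]
    simp only [List.foldl_cons, List.foldl_nil, hlast]
    by_cases ha : a == "" <;> simp [ha, List.filter_append]

lemma pvMain (xs : List String) (up : Bool) :
    (List.foldl (pvStepA xs.length) (pvApplyUp up xs) (pvIndices xs)).filter
        (fun s => !(s == ""))
      = pvGo up xs := by
  induction xs generalizing up with
  | nil => cases up <;> simp [pvIndices, pvApplyUp, pvGo, List.zipIdx]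
  | cons x rest ih =>
    have hx' : pvApplyUp up (x :: rest)
        = (if up then PySem.Str.upper x else x) :: rest := by
      cases up <;> simp [pvApplyUp]
    rw [pvIndices_cons, hx']
    by_cases hs : pvIsShift x
    · cases rest with
      | nil =>
          -- trailing shift: its index is collected but the step is a no-op (1 < 1 fails)
          rw [if_pos hs]
          by_cases h0 : ((if up then PySem.Str.upper x else x) == "") <;>
            simp [pvIndices, List.zipIdx, pvStepA, pvGo, hs, h0]
      | cons y rs =>
          rw [if_pos hs, List.singleton_append, List.foldl_cons]
          have hstep : pvStepA (x :: y :: rs).length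
              ((if up then PySem.Str.upper x else x) :: y :: rs) 0
              = "" :: PySem.Str.upper y :: rs := by
            unfold pvStepA
            rw [if_pos (by simp)]
            simp [List.set, List.getD]
          rw [hstep,
            show (x :: y :: rs).length = (y :: rs).length + 1 from rfl,
            pvFold_shift, List.filter_cons]
          have ihf := ih (up := true)
          simp only [pvApplyUp] at ihf
          simpa [pvGo, hs] using ihf
    · rw [if_neg hs, List.nil_append,
        show (x :: rest).length = rest.length + 1 from rfl,
        pvFold_shift, List.filter_cons]
      have ihf := ih (up := false)
      simp only [pvApplyUp] at ihf
      rw [ihf]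
      by_cases h0 : ((if up then PySem.Str.upper x else x) == "") <;>
        simp [h0, pvGo, hs]

lemma pvB_fold (xs : List String) (n i : Nat) (out : List String) (up : Bool)
    (h : i + xs.length = n) :
    (List.foldl (pvStepB n) (out, up) (xs.zipIdx i)).1 = out ++ pvGo up xs := by
  induction xs generalizing i out up with
  | nil => simp [List.zipIdx, pvGo]
  | cons x rest ih =>
    rw [show (x :: rest).zipIdx i = (x, i) :: rest.zipIdx (i + 1) by simp [List.zipIdx],
      List.foldl_cons]
    cases rest with
    | nil =>
        -- last element: i + 1 < n is false, so even a shift token is emitted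
        have hn : ¬ (i + 1 < n) := by simp at h; omega
        by_cases h0 : ((if up then PySem.Str.upper x else x) == "") <;>
          simp [pvStepB, hn, List.zipIdx, pvGo, h0]
    | cons y rs =>
        have hn : i + 1 < n := by simp at h; omega
        by_cases hs : pvIsShift x
        · simp only [pvStepB, hs, hn, decide_true, Bool.and_true, if_pos]
          rw [ih (i + 1) out true (by simp at h ⊢; omega)]
          simp [pvGo, hs]
        · simp only [pvStepB, hs, Bool.false_and, Bool.false_eq_true, if_neg,
            not_false_iff]
          rw [ih (i + 1) _ false (by simp at h ⊢; omega)]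
          by_cases h0 : ((if up then PySem.Str.upper x else x) == "") <;>
            simp [h0, pvGo, hs]

-- ===== VERDICT (by name: the statement is the Claim_ definition above) =====
theorem process_shift_modifiers_spec : Claim_equal_process_shift_modifiers := by
  intro chunk _
  unfold Spec_process_shift_modifiers process_shift_modifiers process_shift_modifiers_alt
  rw [pvFilter_fold, List.nil_append,
    pvB_fold chunk chunk.length 0 [] false (by simp), List.nil_append]
  have := pvMain chunk false
  simpa [pvApplyUp, pvIndices] using this
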